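-- pv_equiv track=rewrite | github.com/shauhong/HateNet | backend/HateNet/models/utils.py | cluster_tokens
-- ===== SOURCE A (Python) =====
-- from copy import deepcopy
--
-- def cluster_tokens(tokens, pattern="@@"):
--     tokens = deepcopy(tokens)
--     segments = list()
--     i = 0
--     while len(tokens) > 0:
--         token = tokens.pop(0)
--         if token.endswith(pattern):
--             segment = list()
--             segment.append(i)
--             while True:
--                 i += 1
--                 token = tokens.pop(0)
--                 segment.append(i)
--                 if not token.endswith(pattern):
--                     break
--             segments.append(segment)
--         else:
--             segments.append([i])
--         i += 1
--     return segments
-- ===== SOURCE B (Python) =====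
-- def cluster_tokens(tokens, pattern="@@"):
--     segments = []
--     i = 0
--     n = len(tokens)
--     while i < n:
--         start = i
--         while tokens[i].endswith(pattern):
--             i += 1  # raises IndexError if a trailing run reaches the end, like A
--         segments.append(list(range(start, i + 1)))
--         i += 1
--     return segments
-- ===== Notes on version B (the rewrite author's own statement) =====
-- stated objective: simpler
-- what changed: Replaces the deepcopy + pop(0) queue that appends one index at a time with an integer cursor that first locates the end of each run and then materialises the whole segment as list(range(start, i+1)).
import Mathlib
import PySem

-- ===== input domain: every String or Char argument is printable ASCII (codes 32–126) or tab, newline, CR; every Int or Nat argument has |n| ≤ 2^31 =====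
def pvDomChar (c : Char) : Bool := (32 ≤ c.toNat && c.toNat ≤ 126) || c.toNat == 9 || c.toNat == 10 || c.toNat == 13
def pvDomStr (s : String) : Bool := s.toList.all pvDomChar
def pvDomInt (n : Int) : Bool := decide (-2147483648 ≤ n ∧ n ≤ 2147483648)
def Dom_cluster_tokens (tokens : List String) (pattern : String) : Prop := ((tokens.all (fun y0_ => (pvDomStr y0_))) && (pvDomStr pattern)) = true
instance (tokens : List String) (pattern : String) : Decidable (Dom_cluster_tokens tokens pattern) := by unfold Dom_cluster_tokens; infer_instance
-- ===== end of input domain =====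

-- B replaces A's deepcopy + pop(0) queue (appending indices one at a time) by an integer
-- cursor that finds each run's end and emits the segment as one range; return values agree
-- on Pre_ (inputs where A does not raise). Objective: simpler.

-- ===== PORT A =====
-- inner 'while True' loop of A: pops tokens, increments i, appends i to segment,
-- breaks after the first popped token that does not end with pattern.
-- On an empty queue Python raises IndexError (excluded by Pre_); we stop there.
def clusterInnerA (pattern : String) : List String → Int → List Int → (List Int × List String × Int)
  | [], i, segment => (segment, [], i)          -- Python: tokens.pop(0) raises IndexError here
  | token :: rest, i, segment =>
    let i' := i + 1
    let segment' := segment ++ [i']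
    if ¬ (PySem.Str.endswith token pattern) then (segment', rest, i')
    else clusterInnerA pattern rest i' segment'

-- outer 'while len(tokens) > 0' loop of A; each iteration consumes at least one token,
-- so fuel = length of the initial queue makes the structural recursion total
def clusterOuterA (pattern : String) : Nat → List String → Int → List (List Int)
  | _, [], _ => []
  | 0, _ :: _, _ => []                          -- never reached: fuel ≥ queue length
  | fuel + 1, token :: rest, i =>
    if PySem.Str.endswith token pattern then
      let r := clusterInnerA pattern rest i [i]
      r.1 :: clusterOuterA pattern fuel r.2.1 (r.2.2 + 1)
    else
      [i] :: clusterOuterA pattern fuel rest (i + 1)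

def cluster_tokens (tokens : List String) (pattern : String) : List (List Int) :=
  clusterOuterA pattern tokens.length tokens 0

-- ===== PORT B =====
-- inner cursor advance: while tokens[i].endswith(pattern): i += 1
-- (tokens[i] out of range is Python's IndexError, excluded by Pre_; we stop there);
-- the cursor gains at least 1 per step, so fuel = length + 1 suffices from any start
def clusterInnerB (tokens : List String) (pattern : String) : Nat → Nat → Nat
  | 0, i => i
  | fuel + 1, i =>
    match tokens[i]? with
    | none => i                                 -- Python raises IndexError here
    | some t => if PySem.Str.endswith t pattern then clusterInnerB tokens pattern fuel (i + 1) else i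

-- outer loop of B over the cursor; each iteration advances past at least one token
def clusterOuterB (tokens : List String) (pattern : String) : Nat → Nat → List (List Int)
  | 0, _ => []
  | fuel + 1, i =>
    if i < tokens.length then
      let j := clusterInnerB tokens pattern (tokens.length + 1) i
      PySem.List.pyRange (i : Int) ((j : Int) + 1) 1 :: clusterOuterB tokens pattern fuel (j + 1)
    else []

def cluster_tokens_alt (tokens : List String) (pattern : String) : List (List Int) :=
  clusterOuterB tokens pattern tokens.length 0

-- ===== PRECONDITION & SPEC =====
-- Pre_ excludes exactly the inputs on which A raises IndexError (a trailing run of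
-- pattern-terminated tokens reaching the end of the list); B raises there as well.
def Pre_cluster_tokens (tokens : List String) (pattern : String) : Prop :=
  (tokens.getLast?.elim true (fun t => !PySem.Str.endswith t pattern)) = true
instance (tokens : List String) (pattern : String) : Decidable (Pre_cluster_tokens tokens pattern) := by unfold Pre_cluster_tokens; infer_instance

def pvWitness_cluster_tokens : List String × String := (["a"], "@@")

def Spec_cluster_tokens (tokens : List String) (pattern : String) (out : List (List Int)) : Prop := out = cluster_tokens_alt tokens pattern
instance (tokens : List String) (pattern : String) (out : List (List Int)) : Decidable (Spec_cluster_tokens tokens pattern out) := by unfold Spec_cluster_tokens; infer_instance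

-- ===== CLAIM (what is proved, stated in full; the proofs are below) =====
def Claim_equal_cluster_tokens : Prop := ∀ (tokens : List String) (pattern : String), Dom_cluster_tokens tokens pattern → Pre_cluster_tokens tokens pattern → Spec_cluster_tokens tokens pattern (cluster_tokens tokens pattern)

-- ===== LEMMAS AND PROOFS =====

-- past the end, the cursor does not move (any fuel)
theorem clusterInnerB_none (tokens : List String) (pattern : String) (i : Nat)
    (hi : tokens.length ≤ i) : ∀ f, clusterInnerB tokens pattern f i = i := by
  intro f
  cases f with
  | zero => rfl
  | succ f =>
    simp only [clusterInnerB]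
    rw [List.getElem?_eq_none hi]

-- the cursor result does not depend on the fuel, once the fuel is sufficient
theorem clusterInnerB_fuel (tokens : List String) (pattern : String) :
    ∀ f₁ f₂ i, tokens.length + 1 - i ≤ f₁ → tokens.length + 1 - i ≤ f₂ →
    clusterInnerB tokens pattern f₁ i = clusterInnerB tokens pattern f₂ i := by
  intro f₁
  induction f₁ with
  | zero =>
    intro f₂ i h1 _
    have hi : tokens.length ≤ i := by omega
    rw [clusterInnerB_none tokens pattern i hi, clusterInnerB_none tokens pattern i hi]
  | succ f₁ ih =>
    intro f₂ i h1 h2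
    by_cases hi : tokens.length ≤ i
    · rw [clusterInnerB_none tokens pattern i hi, clusterInnerB_none tokens pattern i hi]
    · have hlt : i < tokens.length := by omega
      cases f₂ with
      | zero => omega
      | succ f₂ =>
        simp only [clusterInnerB, List.getElem?_eq_getElem hlt]
        by_cases he : PySem.Str.endswith tokens[i] pattern = true
        · rw [if_pos he, if_pos he]
          exact ih f₂ (i + 1) (by omega) (by omega)
        · rw [if_neg he, if_neg he]

-- the cursor never moves backwards
theorem clusterInnerB_ge (tokens : List String) (pattern : String) :
    ∀ f i, i ≤ clusterInnerB tokens pattern f i := by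
  intro f
  induction f with
  | zero => intro i; exact le_refl i
  | succ f ih =>
    intro i
    simp only [clusterInnerB]
    split
    · exact le_refl i
    · split
      · exact le_trans (by omega) (ih (i + 1))
      · exact le_refl i

-- the cursor stops no later than the first non-matching token
theorem clusterInnerB_le (tokens : List String) (pattern : String) (m : Nat)
    (hm : m < tokens.length) (hend : PySem.Str.endswith tokens[m] pattern = false) :
    ∀ f i, i ≤ m → clusterInnerB tokens pattern f i ≤ m := by
  intro f
  induction f with
  | zero => intro i hi; exact hi
  | succ f ih =>
    intro i hi
    have hil : i < tokens.length := by omega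
    simp only [clusterInnerB, List.getElem?_eq_getElem hil]
    by_cases he : PySem.Str.endswith tokens[i] pattern = true
    · have hne : i ≠ m := by
        intro h
        subst h
        rw [hend] at he
        simp at he
      rw [if_pos he]
      exact ih (i + 1) (by omega)
    · rw [if_neg he]
      exact hi

-- one-step unfolding of the B-side inner loop when the index is in range
theorem clusterInnerB_succ (tokens : List String) (pattern : String) (f i : Nat)
    (hi : i < tokens.length) :
    clusterInnerB tokens pattern (f + 1) i =
      if PySem.Str.endswith tokens[i] pattern then clusterInnerB tokens pattern f (i + 1) else i := by
  simp only [clusterInnerB, List.getElem?_eq_getElem hi]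

-- one-step unfolding at full fuel (the fuel the port always passes)
theorem clusterInnerB_step (tokens : List String) (pattern : String) (i : Nat)
    (hi : i < tokens.length) :
    clusterInnerB tokens pattern (tokens.length + 1) i =
      if PySem.Str.endswith tokens[i] pattern then
        clusterInnerB tokens pattern (tokens.length + 1) (i + 1)
      else i := by
  rw [clusterInnerB_succ tokens pattern tokens.length i hi]
  by_cases he : PySem.Str.endswith tokens[i] pattern = true
  · rw [if_pos he, if_pos he]
    exact clusterInnerB_fuel tokens pattern tokens.length (tokens.length + 1) (i + 1) (by omega) (by omega)
  · rw [if_neg he, if_neg he]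

-- A's inner loop equals: segment extended by the index range up to the cursor stop,
-- leftover queue = suffix past the stop, final i = the stop
theorem inner_eq (tokens : List String) (pattern : String) :
    ∀ d (k : Nat) (seg : List Int), tokens.length - k ≤ d →
    clusterInnerB tokens pattern (tokens.length + 1) (k + 1) < tokens.length →
    clusterInnerA pattern (tokens.drop (k + 1)) (k : Int) seg =
      (seg ++ PySem.List.pyRange ((k : Int) + 1) ((clusterInnerB tokens pattern (tokens.length + 1) (k + 1) : Int) + 1) 1,
       tokens.drop (clusterInnerB tokens pattern (tokens.length + 1) (k + 1) + 1),
       (clusterInnerB tokens pattern (tokens.length + 1) (k + 1) : Int)) := by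
  intro d
  induction d with
  | zero =>
    intro k seg hd hj
    have := clusterInnerB_ge tokens pattern (tokens.length + 1) (k + 1)
    omega
  | succ d ih =>
    intro k seg hd hj
    have hge := clusterInnerB_ge tokens pattern (tokens.length + 1) (k + 1)
    have hk1 : k + 1 < tokens.length := by omega
    have h22 : k + 1 + 1 = k + 2 := by omega
    rw [List.drop_eq_getElem_cons hk1]
    have hstep := clusterInnerB_step tokens pattern (k + 1) hk1
    by_cases he : PySem.Str.endswith tokens[k + 1] pattern = true
    · have hrec : clusterInnerB tokens pattern (tokens.length + 1) (k + 1)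
          = clusterInnerB tokens pattern (tokens.length + 1) (k + 2) := by
        rw [hstep, if_pos he, h22]
      rw [hrec] at hj ⊢
      have hge2 := clusterInnerB_ge tokens pattern (tokens.length + 1) (k + 2)
      have hih := ih (k + 1) (seg ++ [(k : Int) + 1]) (by omega) (by rw [h22]; exact hj)
      rw [h22] at hih
      push_cast at hih
      simp only [clusterInnerA]
      rw [if_neg (by simp; simpa using he)]
      rw [hih]
      refine Prod.ext ?_ rfl
      show seg ++ [(k : Int) + 1] ++ PySem.List.pyRange ((k : Int) + 1 + 1) _ 1 = _
      rw [List.append_assoc]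
      congr 1
      symm
      rw [PySem.List.pyRange_one_cons (by omega)]
      rfl
    · have hrec : clusterInnerB tokens pattern (tokens.length + 1) (k + 1) = k + 1 := by
        rw [hstep, if_neg he]
      rw [hrec]
      simp only [clusterInnerA]
      rw [if_pos (by simp; simpa using he)]
      push_cast
      rw [PySem.List.pyRange_one_singleton]

-- both outer loops stop together once the cursor passes the end (any fuels)
theorem outer_nil_A (pattern : String) (f : Nat) (i : Int) :
    clusterOuterA pattern f [] i = [] := by
  cases f <;> rfl

theorem outer_nil_B (tokens : List String) (pattern : String) (k : Nat)
    (hk : tokens.length ≤ k) : ∀ f, clusterOuterB tokens pattern f k = [] := by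
  intro f
  cases f with
  | zero => rfl
  | succ f =>
    simp only [clusterOuterB]
    rw [if_neg (by omega)]

-- main invariant: A on the suffix past k with counter k equals B's cursor loop at k
theorem outer_eq (tokens : List String) (pattern : String)
    (hPre : Pre_cluster_tokens tokens pattern) :
    ∀ fa fb (k : Nat), tokens.length - k ≤ fa → tokens.length - k ≤ fb →
    clusterOuterA pattern fa (tokens.drop k) (k : Int) = clusterOuterB tokens pattern fb k := by
  intro fa
  induction fa with
  | zero =>
    intro fb k ha hb
    have hk : tokens.length ≤ k := by omega
    rw [List.drop_eq_nil_of_le hk, outer_nil_A, outer_nil_B tokens pattern k hk]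
  | succ fa ih =>
    intro fb k ha hb
    by_cases hk : k < tokens.length
    · have hlast : PySem.Str.endswith tokens[tokens.length - 1] pattern = false := by
        unfold Pre_cluster_tokens at hPre
        rw [show tokens.getLast? = some tokens[tokens.length - 1] from by
              rw [List.getLast?_eq_getElem?]; exact List.getElem?_eq_getElem (by omega)] at hPre
        simpa using hPre
      obtain ⟨fb', rfl⟩ : ∃ fb', fb = fb' + 1 := ⟨fb - 1, by omega⟩
      rw [List.drop_eq_getElem_cons hk]
      simp only [clusterOuterB]
      rw [if_pos hk]
      have hstep := clusterInnerB_step tokens pattern k hk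
      by_cases he : PySem.Str.endswith tokens[k] pattern = true
      · have hkm : k ≠ tokens.length - 1 := by
          intro h
          subst h
          rw [hlast] at he
          simp at he
        have hj : clusterInnerB tokens pattern (tokens.length + 1) (k + 1) ≤ tokens.length - 1 :=
          clusterInnerB_le tokens pattern (tokens.length - 1) (by omega) hlast
            (tokens.length + 1) (k + 1) (by omega)
        have hjlt : clusterInnerB tokens pattern (tokens.length + 1) (k + 1) < tokens.length := by omega
        have hge := clusterInnerB_ge tokens pattern (tokens.length + 1) (k + 1)
        have hrecB : clusterInnerB tokens pattern (tokens.length + 1) k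
            = clusterInnerB tokens pattern (tokens.length + 1) (k + 1) := by
          rw [hstep, if_pos he]
        have hinner := inner_eq tokens pattern tokens.length k [(k : Int)] (by omega) hjlt
        simp only [clusterOuterA]
        simp only [hinner, if_pos he, hrecB]
        have hihyp := ih fb' (clusterInnerB tokens pattern (tokens.length + 1) (k + 1) + 1)
          (by omega) (by omega)
        push_cast at hihyp
        rw [hihyp]
        congr 1
        symm
        rw [PySem.List.pyRange_one_cons (by omega)]
        rfl
      · have hrecB : clusterInnerB tokens pattern (tokens.length + 1) k = k := by
          rw [hstep, if_neg he]
        simp only [clusterOuterA]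
        simp only [if_neg he, hrecB]
        have hihyp := ih fb' (k + 1) (by omega) (by omega)
        push_cast at hihyp
        rw [hihyp, PySem.List.pyRange_one_singleton]
    · have hk' : tokens.length ≤ k := by omega
      rw [List.drop_eq_nil_of_le hk', outer_nil_A, outer_nil_B tokens pattern k hk']

-- ===== VERDICT (by name: the statement is the Claim_ definition above) =====
theorem cluster_tokens_spec : Claim_equal_cluster_tokens := by
  intro tokens pattern _ hPre
  unfold Spec_cluster_tokens cluster_tokens cluster_tokens_alt
  simpa using outer_eq tokens pattern hPre tokens.length tokens.length 0 (by omega) (by omega)
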